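-- pv_equiv track=rewrite | github.com/m0n0pr1x/Jaro-Winkler-Distance | test_environement.py | caractere
-- ===== SOURCE A (Python) =====
-- import math
--
-- def caractere(mot1,mot2):
--     formule = math.floor(max(len(mot1), len(mot2)) / 2) - 1
--     m=0
--
--     check_mot1 = [0] * len(mot1)#compteur de lettre par indice pr le mot1
--     # On veut éviter de compter 2 fois les mêmes élements
--     # Par exemple: on ne veut pas un duplicata des 2 e à pEnche et plEnchet
--     check_mot2 = [0] * len(mot2)#compteur de lettre par indice pr le mot1
--     for i in range(len(mot1)):
--         #on commence par le premier mot
--         for j in range(len(mot2)):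
--             if mot1[i] == mot2[j] and abs(i - j) <= formule and check_mot2[j] == 0:
--                 #si les 2 mots sont égaux et qu'ils sont compris dans une fenetre définie
--                 #par formule et que la lettre n'a pas déja était compté dans le mot2
--                 check_mot1[i] +=1
--                 check_mot2[j] +=1
--                 m+=1
--                 break#on sarrete car on a trouvé nos 2 lettres correspondantes
--                 #on passe donc a la lettre suivante du mot1
--
--
--     return check_mot1,check_mot2,m
-- ===== SOURCE B (Python) =====
-- import math
--
-- def caractere(mot1, mot2):
--     # Per-character position lists over mot2 + a moving per-character pointer:
--     # the matched j for each i is always the smallest unused in-window position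
--     # of the character, so a pointer that only moves forward replaces A's inner scan.
--     formule = math.floor(max(len(mot1), len(mot2)) / 2) - 1
--     positions = {}
--     for j, ch in enumerate(mot2):
--         positions.setdefault(ch, []).append(j)
--     ptr = {}
--     check_mot1 = []
--     check_mot2 = [0] * len(mot2)
--     m = 0
--     for i, ch in enumerate(mot1):
--         lst = positions.get(ch, [])
--         k = ptr.get(ch, 0)
--         while k < len(lst) and lst[k] < i - formule:
--             k += 1
--         if k < len(lst) and lst[k] <= i + formule:
--             check_mot2[lst[k]] = 1
--             check_mot1.append(1)
--             m += 1
--             k += 1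
--         else:
--             check_mot1.append(0)
--         ptr[ch] = k
--     return check_mot1, check_mot2, m
-- ===== Notes on version B (the rewrite author's own statement) =====
-- stated objective: faster
-- what changed: Replaces A's inner linear scan of mot2 per character of mot1 by per-character position lists of mot2 built once plus a forward-only pointer per character (the matched j is always the smallest unused in-window position of that character), giving one amortized pass instead of nested loops.
import Mathlib
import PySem

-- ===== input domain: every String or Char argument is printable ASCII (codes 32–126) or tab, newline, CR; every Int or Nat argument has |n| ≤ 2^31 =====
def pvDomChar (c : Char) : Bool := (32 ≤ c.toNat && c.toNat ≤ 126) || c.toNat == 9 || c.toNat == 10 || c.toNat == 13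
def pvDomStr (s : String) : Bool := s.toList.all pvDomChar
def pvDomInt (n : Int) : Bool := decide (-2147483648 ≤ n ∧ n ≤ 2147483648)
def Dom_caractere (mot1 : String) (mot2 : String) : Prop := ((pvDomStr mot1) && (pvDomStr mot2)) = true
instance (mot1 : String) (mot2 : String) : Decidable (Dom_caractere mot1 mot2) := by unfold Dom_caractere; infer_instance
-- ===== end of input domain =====

-- B replaces A's inner scan of mot2 by per-character position lists of mot2 plus a
-- forward-only pointer per character; objective: faster (one amortized pass instead of nested loops).

-- ===== PORT A =====
-- inner 'for j in range(len(mot2)): … break' loop of A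
def Ainner (c1 c2 : List Char) (f : Int) (i : Nat) (st : List Int × List Int × Int) (j : Nat) :
    List Int × List Int × Int :=
  if h : j < c2.length then
    if c1.getD i ' ' = c2[j] ∧ |(i : Int) - (j : Int)| ≤ f ∧ st.2.1.getD j 0 = 0 then
      (st.1.set i (st.1.getD i 0 + 1), st.2.1.set j (st.2.1.getD j 0 + 1), st.2.2 + 1)
    else Ainner c1 c2 f i st (j + 1)
  else st
  termination_by c2.length - j

def caractere (mot1 : String) (mot2 : String) : List Int × List Int × Int :=
  let c1 := mot1.toList
  let c2 := mot2.toList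
  let formule : Int := PySem.Int.floordiv (max (c1.length : Int) (c2.length : Int)) 2 - 1
  (List.range c1.length).foldl (fun st i => Ainner c1 c2 formule i st 0)
    (List.replicate c1.length 0, List.replicate c2.length 0, 0)

-- ===== PORT B =====
-- 'for j, ch in enumerate(mot2): positions.setdefault(ch, []).append(j)'
def buildPos (c2 : List Char) : PySem.Dict Char (List Nat) :=
  c2.zipIdx.foldl (fun d p => d.modify p.1 [] (· ++ [p.2])) PySem.Dict.empty

-- 'while k < len(lst) and lst[k] < i - formule: k += 1'
def Bwhile (lst : List Nat) (low : Int) (k : Nat) : Nat :=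
  if h : k < lst.length then
    if (lst.getD k 0 : Int) < low then Bwhile lst low (k + 1) else k
  else k
  termination_by lst.length - k

-- body of B's 'for i, ch in enumerate(mot1)' loop; state = (ptr, check_mot1, check_mot2, m)
def Bstep (positions : PySem.Dict Char (List Nat)) (f : Int)
    (st : PySem.Dict Char Nat × List Int × List Int × Int) (p : Char × Nat) :
    PySem.Dict Char Nat × List Int × List Int × Int :=
  let lst := positions.getD p.1 []
  let k := Bwhile lst ((p.2 : Int) - f) (st.1.getD p.1 0)
  if k < lst.length ∧ ((lst.getD k 0 : Int) ≤ (p.2 : Int) + f) then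
    (st.1.insert p.1 (k + 1), st.2.1 ++ [1], st.2.2.1.set (lst.getD k 0) 1, st.2.2.2 + 1)
  else
    (st.1.insert p.1 k, st.2.1 ++ [0], st.2.2.1, st.2.2.2)

def caractere_alt (mot1 : String) (mot2 : String) : List Int × List Int × Int :=
  let c1 := mot1.toList
  let c2 := mot2.toList
  let formule : Int := PySem.Int.floordiv (max (c1.length : Int) (c2.length : Int)) 2 - 1
  let positions := buildPos c2
  let r := c1.zipIdx.foldl (Bstep positions formule)
    (PySem.Dict.empty, [], List.replicate c2.length 0, 0)
  (r.2.1, r.2.2.1, r.2.2.2)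

-- ===== PRECONDITION & SPEC =====
def Spec_caractere (mot1 : String) (mot2 : String) (out : List Int × List Int × Int) : Prop := out = caractere_alt mot1 mot2
instance (mot1 : String) (mot2 : String) (out : List Int × List Int × Int) : Decidable (Spec_caractere mot1 mot2 out) := by unfold Spec_caractere; infer_instance

-- ===== CLAIM (what is proved, stated in full; the proofs are below) =====
def Claim_equal_caractere : Prop := ∀ (mot1 : String) (mot2 : String), Dom_caractere mot1 mot2 → Spec_caractere mot1 mot2 (caractere mot1 mot2)

-- ===== LEMMAS AND PROOFS =====

-- positions of character c in c2, in increasing order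
def PP (c2 : List Char) (c : Char) : List Nat :=
  ((c2.zipIdx).filter (fun p => p.1 == c)).map (·.2)

-- generic bridge: getD at an in-range index is getElem
lemma getD_at {α : Type} (l : List α) (t : Nat) (d : α) (h : t < l.length) :
    l.getD t d = l[t] := by
  simp [List.getD_eq_getElem?_getD, List.getElem?_eq_getElem h]

lemma buildPos_getD (c2 : List Char) (c : Char) : (buildPos c2).getD c [] = PP c2 c := by
  unfold buildPos PP
  rw [PySem.Dict.getD_foldl_modify_append]
  simp [PySem.Dict.getD_empty]

lemma mem_PP {c2 : List Char} {c : Char} {j : Nat} :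
    j ∈ PP c2 c ↔ j < c2.length ∧ c2.getD j ' ' = c := by
  unfold PP
  simp only [List.mem_map, List.mem_filter]
  constructor
  · rintro ⟨⟨ch, j'⟩, ⟨hmem, hch⟩, rfl⟩
    have h1 : c2[j']? = some ch := List.mk_mem_zipIdx_iff_getElem?.mp hmem
    have h2 : j' < c2.length := by
      rcases List.getElem?_eq_some_iff.mp h1 with ⟨h, _⟩; exact h
    have h3 : ch = c := by simpa using hch
    subst h3
    refine ⟨h2, ?_⟩
    simp [List.getD_eq_getElem?_getD, h1]
  · rintro ⟨hlt, hget⟩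
    refine ⟨(c, j), ⟨?_, by simp⟩, rfl⟩
    apply List.mk_mem_zipIdx_iff_getElem?.mpr
    rw [List.getElem?_eq_getElem hlt]
    rw [getD_at c2 j ' ' hlt] at hget
    rw [hget]

lemma zipIdx_snd_ge (l : List Char) : ∀ (n : Nat) (q : Char × Nat), q ∈ l.zipIdx n → n ≤ q.2 := by
  induction l with
  | nil => intro n q hq; simp at hq
  | cons a t ih =>
    intro n q hq
    rw [List.zipIdx_cons] at hq
    rcases List.mem_cons.mp hq with h | h
    · subst h; simp
    · exact le_trans (by omega) (ih (n + 1) q h)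

lemma zipIdx_pairwise (l : List Char) :
    ∀ n : Nat, (l.zipIdx n).Pairwise (fun p q : Char × Nat => p.2 < q.2) := by
  induction l with
  | nil => intro n; simp
  | cons a t ih =>
    intro n
    rw [List.zipIdx_cons, List.pairwise_cons]
    exact ⟨fun q hq => lt_of_lt_of_le (by omega) (zipIdx_snd_ge t (n + 1) q hq), ih (n + 1)⟩

lemma PP_pairwise (c2 : List Char) (c : Char) : (PP c2 c).Pairwise (· < ·) := by
  unfold PP
  rw [List.pairwise_map]
  exact List.Pairwise.sublist List.filter_sublist (zipIdx_pairwise c2 0)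

lemma PP_getD_lt {c2 : List Char} {c : Char} {t t' : Nat} (h : t < t')
    (h' : t' < (PP c2 c).length) : (PP c2 c).getD t 0 < (PP c2 c).getD t' 0 := by
  have ht : t < (PP c2 c).length := lt_trans h h'
  have hp := (List.pairwise_iff_getElem).mp (PP_pairwise c2 c) t t' ht h' h
  rwa [getD_at _ _ _ ht, getD_at _ _ _ h']

lemma PP_getD_mem {c2 : List Char} {c : Char} {t : Nat} (h : t < (PP c2 c).length) :
    (PP c2 c).getD t 0 ∈ PP c2 c := by
  rw [getD_at _ _ _ h]
  exact List.getElem_mem h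

lemma PP_index {c2 : List Char} {c : Char} {j : Nat} (h : j ∈ PP c2 c) :
    ∃ t, t < (PP c2 c).length ∧ (PP c2 c).getD t 0 = j := by
  obtain ⟨t, ht, heq⟩ := List.mem_iff_getElem.mp h
  exact ⟨t, ht, by rw [getD_at _ _ _ ht, heq]⟩

lemma getD_set_of_ne {l : List Int} {i j : Nat} {v : Int} (h : i ≠ j) :
    (l.set i v).getD j 0 = l.getD j 0 := by
  simp [List.getD_eq_getElem?_getD, h]

lemma getD_set_self {l : List Int} {i : Nat} {v : Int} (h : i < l.length) :
    (l.set i v).getD i 0 = v := by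
  simp [List.getD_eq_getElem?_getD, h]

lemma used_preserve {ch2 : List Int} {x js : Nat} (h : ch2.getD x 0 ≠ 0) :
    (ch2.set js 1).getD x 0 ≠ 0 := by
  by_cases hx : js = x
  · subst hx
    have hlt : js < ch2.length := by
      by_contra hge
      rw [List.getD_eq_getElem?_getD, List.getElem?_eq_none (by omega)] at h
      simp at h
    rw [getD_set_self hlt]; omega
  · rwa [getD_set_of_ne hx]

lemma getD_replicate_zero (n x : Nat) : (List.replicate n (0 : Int)).getD x 0 = 0 := by
  rcases Nat.lt_or_ge x n with h | h
  · simp [List.getD_eq_getElem?_getD, h]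
  · rw [List.getD_eq_getElem?_getD, List.getElem?_eq_none (by simpa using h)]; rfl

lemma getD_append_length (l r : List Int) (d : Int) : (l ++ r).getD l.length d = r.getD 0 d := by
  simp [List.getD_eq_getElem?_getD, List.getElem?_append_right (le_refl l.length)]

lemma set_append_length (l r : List Int) (v : Int) :
    (l ++ r).set l.length v = l ++ r.set 0 v := by
  induction l with
  | nil => simp
  | cons a t ih => simp [ih]

-- the index-i member of check_mot1 goes from 0 to 1 when step i finds a match
lemma set_getD_succ_append (l rest : List Int) (i : Nat) (hi : i = l.length) :
    (l ++ 0 :: rest).set i ((l ++ 0 :: rest).getD i 0 + 1) = (l ++ [1]) ++ rest := by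
  subst hi
  rw [getD_append_length, List.getD_cons_zero, set_append_length]
  simp

-- the predicate of A's inner loop at index j (with ch2 the current check_mot2)
def Q (c2 : List Char) (f : Int) (i : Nat) (c : Char) (ch2 : List Int) (j : Nat) : Prop :=
  j < c2.length ∧ c2.getD j ' ' = c ∧ |(i : Int) - (j : Int)| ≤ f ∧ ch2.getD j 0 = 0

lemma Ainner_none (c1 c2 : List Char) (f : Int) (i : Nat) (st : List Int × List Int × Int)
    (j0 : Nat) (h : ∀ j, j0 ≤ j → ¬ Q c2 f i (c1.getD i ' ') st.2.1 j) :
    Ainner c1 c2 f i st j0 = st := by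
  rw [Ainner]
  split
  · next hlt =>
    rw [if_neg, Ainner_none c1 c2 f i st (j0 + 1) (fun j hj => h j (by omega))]
    intro hc
    exact h j0 (le_refl _) ⟨hlt, by rw [getD_at c2 j0 ' ' hlt, ← hc.1], hc.2.1, hc.2.2⟩
  · rfl
  termination_by c2.length - j0

lemma Ainner_found (c1 c2 : List Char) (f : Int) (i : Nat) (st : List Int × List Int × Int)
    (j0 js : Nat) (h0 : j0 ≤ js) (hq : Q c2 f i (c1.getD i ' ') st.2.1 js)
    (hmin : ∀ j, j0 ≤ j → j < js → ¬ Q c2 f i (c1.getD i ' ') st.2.1 j) :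
    Ainner c1 c2 f i st j0 =
      (st.1.set i (st.1.getD i 0 + 1), st.2.1.set js 1, st.2.2 + 1) := by
  obtain ⟨hq1, hq2, hq3, hq4⟩ := hq
  rw [Ainner, dif_pos (by omega : j0 < c2.length)]
  by_cases hj : j0 = js
  · subst hj
    rw [if_pos ⟨by rw [getD_at c2 j0 ' ' hq1] at hq2; exact hq2.symm, hq3, hq4⟩, hq4]
    norm_num
  · have hlt2 : j0 < js := by omega
    rw [if_neg, Ainner_found c1 c2 f i st (j0 + 1) js (by omega) ⟨hq1, hq2, hq3, hq4⟩
      (fun j a b => hmin j (by omega) b)]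
    intro hc
    exact hmin j0 (le_refl _) hlt2
      ⟨by omega, by rw [getD_at c2 j0 ' ' (by omega), ← hc.1], hc.2.1, hc.2.2⟩
  termination_by js - j0

lemma Bwhile_spec (lst : List Nat) (low : Int) (k0 : Nat) (h : k0 ≤ lst.length) :
    k0 ≤ Bwhile lst low k0 ∧ Bwhile lst low k0 ≤ lst.length ∧
    (∀ t, k0 ≤ t → t < Bwhile lst low k0 → (lst.getD t 0 : Int) < low) ∧
    (Bwhile lst low k0 < lst.length → ¬ ((lst.getD (Bwhile lst low k0) 0 : Int) < low)) := by
  rw [Bwhile]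
  split
  · next hlt =>
    split
    · next hlow =>
      obtain ⟨ih1, ih2, ih3, ih4⟩ := Bwhile_spec lst low (k0 + 1) (by omega)
      refine ⟨by omega, ih2, ?_, ih4⟩
      intro t ht1 ht2
      rcases Nat.eq_or_lt_of_le ht1 with rfl | ht3
      · exact hlow
      · exact ih3 t (by omega) ht2
    · next hnlow =>
      exact ⟨le_refl _, le_of_lt hlt, fun t h1 h2 => absurd h1 (by omega), fun _ => hnlow⟩
  · next hge =>
    exact ⟨le_refl _, h, fun t h1 h2 => absurd h1 (by omega), fun hlt' => absurd hlt' hge⟩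
  termination_by lst.length - k0

-- pointer invariant of B after i outer steps
def InvPtr (c2 : List Char) (f : Int) (i : Nat) (ch2 : List Int) (ptr : PySem.Dict Char Nat) : Prop :=
  ∀ c : Char,
    ptr.getD c 0 ≤ (PP c2 c).length ∧
    (∀ t, t < ptr.getD c 0 →
      ch2.getD ((PP c2 c).getD t 0) 0 ≠ 0 ∨ (((PP c2 c).getD t 0 : Nat) : Int) < (i : Int) - f) ∧
    (∀ t, ptr.getD c 0 ≤ t → t < (PP c2 c).length → ch2.getD ((PP c2 c).getD t 0) 0 = 0)

-- coupling of A's and B's loop states after i outer steps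
def SRel (c1 c2 : List Char) (f : Int) (i : Nat) (stA : List Int × List Int × Int)
    (stB : PySem.Dict Char Nat × List Int × List Int × Int) : Prop :=
  stA.1 = stB.2.1 ++ List.replicate (c1.length - i) 0 ∧
  stB.2.1.length = i ∧
  stA.2.1 = stB.2.2.1 ∧
  stA.2.2 = stB.2.2.2 ∧
  stA.2.1.length = c2.length ∧
  InvPtr c2 f i stA.2.1 stB.1

lemma step_rel (c1 c2 : List Char) (f : Int) (i : Nat) (hi : i < c1.length)
    (stA : List Int × List Int × Int) (stB : PySem.Dict Char Nat × List Int × List Int × Int)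
    (hrel : SRel c1 c2 f i stA stB) :
    SRel c1 c2 f (i + 1) (Ainner c1 c2 f i stA 0) (Bstep (buildPos c2) f stB (c1[i], i)) := by
  obtain ⟨hA1, hlen1, hch2, hm, hlen2, hinv⟩ := hrel
  have hc : c1.getD i ' ' = c1[i] := getD_at c1 i ' ' hi
  obtain ⟨hk0le, hpre, hsuf⟩ := hinv c1[i]
  obtain ⟨hk1, hk2, hmid, hstop⟩ :=
    Bwhile_spec (PP c2 c1[i]) ((i : Int) - f) (stB.1.getD c1[i] 0) hk0le
  simp only [Bstep, buildPos_getD]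
  set L := PP c2 c1[i] with hLdef
  set k := Bwhile L ((i : Int) - f) (stB.1.getD c1[i] 0) with hkdef
  clear_value k
  by_cases hcase : k < L.length ∧ ((L.getD k 0 : Nat) : Int) ≤ (i : Int) + f
  · -- a match is found; js := L.getD k 0 is the matched index of mot2
    have hjs_mem : (L.getD k 0) ∈ PP c2 c1[i] := by
      rw [← hLdef]; exact PP_getD_mem hcase.1
    obtain ⟨hjs_lt, hjs_ch⟩ := mem_PP.mp hjs_mem
    have hjs_unused : stA.2.1.getD (L.getD k 0) 0 = 0 := hsuf k hk1 hcase.1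
    have hwin : |(i : Int) - ((L.getD k 0 : Nat) : Int)| ≤ f := by
      have h1 := hstop hcase.1
      rw [abs_le]
      constructor <;> omega
    have hq : Q c2 f i (c1.getD i ' ') stA.2.1 (L.getD k 0) :=
      ⟨hjs_lt, by rw [hc]; exact hjs_ch, hwin, hjs_unused⟩
    have hmin : ∀ j, 0 ≤ j → j < L.getD k 0 → ¬ Q c2 f i (c1.getD i ' ') stA.2.1 j := by
      intro j _ hjlt hQ
      have hjmem : j ∈ L := by
        rw [hLdef]; exact mem_PP.mpr ⟨hQ.1, by rw [← hc]; exact hQ.2.1⟩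
      have hjmem' : j ∈ PP c2 c1[i] := by rw [← hLdef]; exact hjmem
      obtain ⟨t, htlen, htj⟩ := PP_index hjmem'
      rw [← hLdef] at htlen htj
      have hwinj := hQ.2.2.1
      rw [abs_le] at hwinj
      rcases Nat.lt_or_ge t (stB.1.getD c1[i] 0) with ht | ht
      · rcases hpre t ht with hu | hb
        · rw [htj] at hu; exact hu hQ.2.2.2
        · rw [htj] at hb; omega
      · rcases Nat.lt_or_ge t k with ht2 | ht2
        · have := hmid t ht ht2
          rw [htj] at this; omega
        · rcases Nat.eq_or_lt_of_le ht2 with rfl | ht3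
          · omega
          · have hlt := PP_getD_lt (c2 := c2) (c := c1[i]) ht3 (by rw [← hLdef]; exact htlen)
            rw [← hLdef] at hlt
            rw [htj] at hlt; omega
    rw [Ainner_found c1 c2 f i stA 0 (L.getD k 0) (Nat.zero_le _) hq hmin, if_pos hcase]
    have hrep : c1.length - i = (c1.length - (i + 1)) + 1 := by omega
    refine ⟨?_, by simp [hlen1],
      show stA.2.1.set (L.getD k 0) 1 = stB.2.2.1.set (L.getD k 0) 1 by rw [hch2],
      show stA.2.2 + 1 = stB.2.2.2 + 1 by rw [hm],
      show (stA.2.1.set (L.getD k 0) 1).length = c2.length by simp [hlen2], ?_⟩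
    · show stA.1.set i (stA.1.getD i 0 + 1) =
        (stB.2.1 ++ [1]) ++ List.replicate (c1.length - (i + 1)) 0
      rw [hA1, hrep, List.replicate_succ]
      exact set_getD_succ_append stB.2.1 _ i hlen1.symm
    · show InvPtr c2 f (i + 1) (stA.2.1.set (L.getD k 0) 1) (stB.1.insert c1[i] (k + 1))
      intro c'
      by_cases hcc : c' = c1[i]
      · subst hcc
        rw [PySem.Dict.getD_insert, if_pos rfl, ← hLdef]
        refine ⟨hcase.1, ?_, ?_⟩
        · intro t ht
          rcases Nat.lt_or_ge t k with ht2 | ht2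
          · rcases Nat.lt_or_ge t (stB.1.getD c1[i] 0) with ht3 | ht3
            · rcases hpre t ht3 with hu | hb
              · exact Or.inl (used_preserve hu)
              · exact Or.inr (by omega)
            · exact Or.inr (by have := hmid t ht3 ht2; omega)
          · have ht4 : t = k := by omega
            subst ht4
            left
            rw [getD_set_self (by omega : L.getD t 0 < stA.2.1.length)]
            omega
        · intro t h1 h2
          have holdz : stA.2.1.getD (L.getD t 0) 0 = 0 := hsuf t (by omega) h2
          have hne : L.getD k 0 ≠ L.getD t 0 := by
            have hlt := PP_getD_lt (c2 := c2) (c := c1[i]) (show k < t by omega) (by rw [← hLdef]; exact h2)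
            rw [← hLdef] at hlt
            omega
          rw [getD_set_of_ne hne]
          exact holdz
      · rw [PySem.Dict.getD_insert, if_neg hcc]
        obtain ⟨a, b, d⟩ := hinv c'
        refine ⟨a, ?_, ?_⟩
        · intro t ht
          rcases b t ht with hu | hb
          · exact Or.inl (used_preserve hu)
          · exact Or.inr (by omega)
        · intro t h1 h2
          have hmem' := PP_getD_mem h2
          obtain ⟨hx1, hx2⟩ := mem_PP.mp hmem'
          have hne : L.getD k 0 ≠ (PP c2 c').getD t 0 := by
            intro he
            rw [← he] at hx2
            exact hcc (by rw [← hx2, hjs_ch])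
          rw [getD_set_of_ne hne]
          exact d t h1 h2
  · -- no match in the window for character c1[i]
    have hnone : ∀ j, (0 : Nat) ≤ j → ¬ Q c2 f i (c1.getD i ' ') stA.2.1 j := by
      intro j _ hQ
      have hjmem : j ∈ L := by
        rw [hLdef]; exact mem_PP.mpr ⟨hQ.1, by rw [← hc]; exact hQ.2.1⟩
      have hjmem' : j ∈ PP c2 c1[i] := by rw [← hLdef]; exact hjmem
      obtain ⟨t, htlen, htj⟩ := PP_index hjmem'
      rw [← hLdef] at htlen htj
      have hwinj := hQ.2.2.1
      rw [abs_le] at hwinj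
      rcases Nat.lt_or_ge t (stB.1.getD c1[i] 0) with ht | ht
      · rcases hpre t ht with hu | hb
        · rw [htj] at hu; exact hu hQ.2.2.2
        · rw [htj] at hb; omega
      · rcases Nat.lt_or_ge t k with ht2 | ht2
        · have := hmid t ht ht2
          rw [htj] at this; omega
        · have hklen : k < L.length := by omega
          apply hcase
          refine ⟨hklen, ?_⟩
          rcases Nat.eq_or_lt_of_le ht2 with rfl | ht3
          · rw [htj]; omega
          · have hlt := PP_getD_lt (c2 := c2) (c := c1[i]) ht3 (by rw [← hLdef]; exact htlen)
            rw [← hLdef] at hlt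
            rw [htj] at hlt; omega
    rw [Ainner_none c1 c2 f i stA 0 hnone, if_neg hcase]
    have hrep : c1.length - i = (c1.length - (i + 1)) + 1 := by omega
    refine ⟨?_, by simp [hlen1], hch2, hm, hlen2, ?_⟩
    · show stA.1 = (stB.2.1 ++ [0]) ++ List.replicate (c1.length - (i + 1)) 0
      rw [hA1, hrep, List.replicate_succ]
      simp
    · show InvPtr c2 f (i + 1) stA.2.1 (stB.1.insert c1[i] k)
      intro c'
      by_cases hcc : c' = c1[i]
      · subst hcc
        rw [PySem.Dict.getD_insert, if_pos rfl, ← hLdef]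
        refine ⟨hk2, ?_, ?_⟩
        · intro t ht
          rcases Nat.lt_or_ge t (stB.1.getD c1[i] 0) with ht3 | ht3
          · rcases hpre t ht3 with hu | hb
            · exact Or.inl hu
            · exact Or.inr (by omega)
          · exact Or.inr (by have := hmid t ht3 ht; omega)
        · intro t h1 h2
          exact hsuf t (by omega) h2
      · rw [PySem.Dict.getD_insert, if_neg hcc]
        obtain ⟨a, b, d⟩ := hinv c'
        refine ⟨a, ?_, d⟩
        intro t ht
        rcases b t ht with hu | hb
        · exact Or.inl hu
        · exact Or.inr (by omega)

lemma fold_rel (c1 c2 : List Char) (f : Int) :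
    ∀ (k i : Nat), i + k = c1.length →
    ∀ stA stB, SRel c1 c2 f i stA stB →
    SRel c1 c2 f c1.length
      ((List.range' i k).foldl (fun st j => Ainner c1 c2 f j st 0) stA)
      (((c1.drop i).zipIdx i).foldl (Bstep (buildPos c2) f) stB) := by
  intro k
  induction k with
  | zero =>
    intro i hik stA stB h
    have hieq : i = c1.length := by omega
    subst hieq
    simpa [List.drop_length] using h
  | succ k ih =>
    intro i hik stA stB h
    have hi : i < c1.length := by omega
    rw [List.range'_succ, List.drop_eq_getElem_cons hi, List.zipIdx_cons]
    simp only [List.foldl_cons]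
    exact ih (i + 1) (by omega) _ _ (step_rel c1 c2 f i hi stA stB h)

lemma init_rel (c1 c2 : List Char) (f : Int) :
    SRel c1 c2 f 0 (List.replicate c1.length 0, List.replicate c2.length 0, 0)
      (PySem.Dict.empty, [], List.replicate c2.length 0, 0) := by
  refine ⟨by simp, rfl, rfl, rfl, by simp, ?_⟩
  intro c
  rw [PySem.Dict.getD_empty]
  refine ⟨Nat.zero_le _, by omega, ?_⟩
  intro t _ _
  exact getD_replicate_zero _ _

-- ===== VERDICT (by name: the statement is the Claim_ definition above) =====
theorem caractere_spec : Claim_equal_caractere := by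
  intro mot1 mot2 _
  unfold Spec_caractere
  show caractere mot1 mot2 = caractere_alt mot1 mot2
  simp only [caractere, caractere_alt]
  have h := fold_rel mot1.toList mot2.toList
    (PySem.Int.floordiv (max (mot1.toList.length : Int) (mot2.toList.length : Int)) 2 - 1)
    mot1.toList.length 0 (by omega) _ _ (init_rel mot1.toList mot2.toList _)
  rw [List.drop_zero] at h
  obtain ⟨h1, _, h3, h4, _, _⟩ := h
  rw [List.range_eq_range']
  refine Prod.ext ?_ (Prod.ext ?_ ?_)
  · simpa using h1
  · exact h3
  · exact h4
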